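-- pv_equiv track=rewrite | github.com/alexandresilvapires/ChordNation | Source/music.py | add_accidental_values
-- ===== SOURCE A (Python) =====
-- def count_accidentals(note) -> int:
--     """ Given a note, returns total number of accidental values. -1 for each flat, +1 for each sharp"""
--
--     accidentals = 0
--     for letter in note:
--         if letter == '#':
--             accidentals += 1
--         elif letter == 'b':
--             accidentals -= 1
--     return accidentals
--
-- def note_without_accidental(note):
--     """ Given a note, returns the same note without accidentals """
--
--     newNote = ''
--     for letter in note:
--         if(letter != 'b' and letter != '#'):
--             newNote += letter
--     return newNote
--
-- def normalize_accidentals(note):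
--     """ Given a note, normalizes the notes acciddentals to cancel # and b"""
--
--     # Counts accidentals, makes note default letter, then adds remaining accidentals
--     accidentals = count_accidentals(note)
--
--     newNote = note_without_accidental(note)
--
--     while accidentals != 0:
--         if accidentals > 0:
--             newNote += '#'
--             accidentals -= 1
--         else:
--             newNote += 'b'
--             accidentals += 1
--     return newNote
--
-- def add_accidental_values(note, accidentals):
--     """ Given a note, adds the accidentals where each flat is -1, and each sharp is +1 """
--     while accidentals != 0:
--         if accidentals > 0:
--             note += '#'
--             accidentals -= 1
--         else:
--             note += 'b'
--             accidentals += 1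
--
--     return normalize_accidentals(note)
-- ===== SOURCE B (Python) =====
-- def add_accidental_values(note, accidentals):
--     """ Given a note, adds the accidentals where each flat is -1, and each sharp is +1 """
--     net = accidentals
--     base = []
--     for ch in note:
--         if ch == '#':
--             net += 1
--         elif ch == 'b':
--             net -= 1
--         else:
--             base.append(ch)
--     suffix = '#' * net if net > 0 else 'b' * (-net)
--     return ''.join(base) + suffix
-- ===== Notes on version B (the rewrite author's own statement) =====
-- stated objective: faster
-- what changed: B replaces A's append-one-char-at-a-time while loops and three separate passes with a single pass computing the net accidental count and the stripped base, then builds the suffix by string multiplication.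
import Mathlib
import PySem

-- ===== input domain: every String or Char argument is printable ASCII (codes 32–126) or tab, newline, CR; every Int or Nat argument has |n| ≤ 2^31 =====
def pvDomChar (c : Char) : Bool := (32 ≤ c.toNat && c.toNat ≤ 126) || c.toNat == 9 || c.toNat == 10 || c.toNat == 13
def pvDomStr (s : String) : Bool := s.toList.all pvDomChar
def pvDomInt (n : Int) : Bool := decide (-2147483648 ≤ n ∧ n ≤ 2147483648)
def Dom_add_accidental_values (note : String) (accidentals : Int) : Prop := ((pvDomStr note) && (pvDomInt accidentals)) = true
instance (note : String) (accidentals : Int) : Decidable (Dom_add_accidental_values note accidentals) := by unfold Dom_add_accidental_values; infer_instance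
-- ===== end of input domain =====

-- B is one pass computing the net accidental count and stripped base, then a replicate suffix,
-- replacing A's append-loop + three extra passes (objective: faster by a constant factor / fewer passes).

-- ===== PORT A =====
-- the 'while accidentals != 0' append loop shared by add_accidental_values and normalize_accidentals
def pvWhileA (nn : List Char) (acc : Int) : List Char :=
  if acc = 0 then nn
  else if acc > 0 then pvWhileA (nn ++ ['#']) (acc - 1)
  else pvWhileA (nn ++ ['b']) (acc + 1)
termination_by acc.natAbs
decreasing_by all_goals omega

-- count_accidentals
def pvCountA (l : List Char) : Int :=
  l.foldl (fun a c => if c = '#' then a + 1 else if c = 'b' then a - 1 else a) 0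

-- note_without_accidental
def pvStripA (l : List Char) : List Char :=
  l.foldl (fun nn c => if c ≠ 'b' ∧ c ≠ '#' then nn ++ [c] else nn) []

-- normalize_accidentals
def pvNormalizeA (l : List Char) : List Char := pvWhileA (pvStripA l) (pvCountA l)

def add_accidental_values (note : String) (accidentals : Int) : String :=
  String.mk (pvNormalizeA (pvWhileA note.toList accidentals))

-- ===== PORT B =====
def add_accidental_values_alt (note : String) (accidentals : Int) : String :=
  let p := note.toList.foldl
    (fun s ch => if ch = '#' then (s.1 + 1, s.2) else if ch = 'b' then (s.1 - 1, s.2) else (s.1, s.2 ++ [ch]))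
    (accidentals, ([] : List Char))
  String.mk (p.2 ++ (if p.1 > 0 then List.replicate p.1.toNat '#' else List.replicate (-p.1).toNat 'b'))

-- ===== PRECONDITION & SPEC =====
def Spec_add_accidental_values (note : String) (accidentals : Int) (out : String) : Prop := out = add_accidental_values_alt note accidentals
instance (note : String) (accidentals : Int) (out : String) : Decidable (Spec_add_accidental_values note accidentals out) := by unfold Spec_add_accidental_values; infer_instance

-- ===== CLAIM (what is proved, stated in full; the proofs are below) =====
def Claim_equal_add_accidental_values : Prop := ∀ (note : String) (accidentals : Int), Dom_add_accidental_values note accidentals → Spec_add_accidental_values note accidentals (add_accidental_values note accidentals)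

-- ===== LEMMAS AND PROOFS =====

-- proof-side recursive versions of count / strip
def pvCnt : List Char → Int
  | [] => 0
  | c :: t => (if c = '#' then 1 else if c = 'b' then -1 else 0) + pvCnt t

def pvStp : List Char → List Char
  | [] => []
  | c :: t => (if c = '#' ∨ c = 'b' then [] else [c]) ++ pvStp t

theorem pvCountA_eq (l : List Char) :
    ∀ a : Int, l.foldl (fun a c => if c = '#' then a + 1 else if c = 'b' then a - 1 else a) a = a + pvCnt l := by
  induction l with
  | nil => intro a; simp [pvCnt]
  | cons c t ih => intro a; simp only [List.foldl_cons, pvCnt, ih]; split_ifs <;> ring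

theorem pvStripA_eq (l : List Char) :
    ∀ b : List Char, l.foldl (fun nn c => if c ≠ 'b' ∧ c ≠ '#' then nn ++ [c] else nn) b = b ++ pvStp l := by
  induction l with
  | nil => intro b; simp [pvStp]
  | cons c t ih => intro b; simp only [List.foldl_cons, pvStp, ih]; split_ifs <;> simp_all

theorem pvScanB_eq (l : List Char) :
    ∀ (net : Int) (base : List Char),
      l.foldl (fun s ch => if ch = '#' then (s.1 + 1, s.2) else if ch = 'b' then (s.1 - 1, s.2) else (s.1, s.2 ++ [ch]))
        (net, base) = (net + pvCnt l, base ++ pvStp l) := by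
  induction l with
  | nil => intro net base; simp [pvCnt, pvStp]
  | cons c t ih => intro net base; simp only [List.foldl_cons, pvCnt, pvStp]; split_ifs <;> simp_all <;> ring

theorem pvWhileA_eq (nn : List Char) (acc : Int) :
    pvWhileA nn acc = nn ++ (if acc > 0 then List.replicate acc.toNat '#' else List.replicate (-acc).toNat 'b') := by
  fun_induction pvWhileA nn acc with
  | case1 nn => simp
  | case2 nn acc h hpos ih =>
      rw [ih]
      by_cases h2 : acc - 1 > 0
      · rw [if_pos h2, if_pos (show acc > 0 from by omega),
            show acc.toNat = (acc - 1).toNat + 1 from by omega, List.replicate_succ]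
        simp
      · rw [if_neg h2, if_pos (show acc > 0 from by omega),
            show acc.toNat = 1 from by omega, show (-(acc - 1)).toNat = 0 from by omega]
        simp
  | case3 nn acc h hpos ih =>
      rw [ih, if_neg (show ¬ acc + 1 > 0 from by omega), if_neg (show ¬ acc > 0 from by omega),
          show (-acc).toNat = (-(acc + 1)).toNat + 1 from by omega, List.replicate_succ]
      simp

theorem pvCnt_append (l1 l2 : List Char) : pvCnt (l1 ++ l2) = pvCnt l1 + pvCnt l2 := by
  induction l1 with
  | nil => simp [pvCnt]
  | cons c t ih => simp [pvCnt, ih]; ring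

theorem pvStp_append (l1 l2 : List Char) : pvStp (l1 ++ l2) = pvStp l1 ++ pvStp l2 := by
  induction l1 with
  | nil => simp [pvStp]
  | cons c t ih => simp [pvStp, ih]

theorem pvCnt_rep_sharp (n : Nat) : pvCnt (List.replicate n '#') = (n : Int) := by
  induction n with
  | zero => simp [pvCnt]
  | succ k ih => simp [List.replicate_succ, pvCnt, ih]; ring

theorem pvCnt_rep_flat (n : Nat) : pvCnt (List.replicate n 'b') = -(n : Int) := by
  induction n with
  | zero => simp [pvCnt]
  | succ k ih => simp [List.replicate_succ, pvCnt, ih]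

theorem pvStp_rep (n : Nat) (c : Char) (h : c = '#' ∨ c = 'b') : pvStp (List.replicate n c) = [] := by
  induction n with
  | zero => simp [pvStp]
  | succ k ih => simp [List.replicate_succ, pvStp, h, ih]

-- ===== VERDICT (by name: the statement is the Claim_ definition above) =====
theorem add_accidental_values_spec : Claim_equal_add_accidental_values := by
  intro note acc _
  unfold Spec_add_accidental_values add_accidental_values add_accidental_values_alt pvNormalizeA pvCountA pvStripA
  rw [pvScanB_eq, pvCountA_eq, pvStripA_eq, pvWhileA_eq note.toList acc]
  set nl := note.toList
  have hR : pvCnt (if acc > 0 then List.replicate acc.toNat '#' else List.replicate (-acc).toNat 'b') = acc := by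
    split_ifs with h
    · rw [pvCnt_rep_sharp]; omega
    · rw [pvCnt_rep_flat]; omega
  have hS : pvStp (if acc > 0 then List.replicate acc.toNat '#' else List.replicate (-acc).toNat 'b') = [] := by
    by_cases h : acc > 0
    · rw [if_pos h]; exact pvStp_rep _ _ (Or.inl rfl)
    · rw [if_neg h]; exact pvStp_rep _ _ (Or.inr rfl)
  rw [pvWhileA_eq]
  simp only [pvCnt_append, pvStp_append, hR, hS, List.append_nil, List.nil_append, zero_add]
  rw [Int.add_comm (pvCnt nl) acc]
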